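-- pv_equiv track=rewrite | github.com/pypi-data/pypi-mirror-369 | packages/fuglu/fuglu-1.6.0.tar.gz/fuglu-1.6.0/src/fuglu/plugins/btc.py | convertbits
-- ===== SOURCE A (Python) =====
-- import typing as tp
--
-- def convertbits(data:tp.List[int], frombits:int, tobits:int, pad:bool=True) -> tp.Optional[tp.List[int]]:
--     """General power-of-2 base conversion."""
--     acc = 0
--     bits = 0
--     ret = []
--     maxv = (1 << tobits) - 1
--     max_acc = (1 << (frombits + tobits - 1)) - 1
--     for value in data:
--         if value < 0 or (value >> frombits):
--             return None
--         acc = ((acc << frombits) | value) & max_acc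
--         bits += frombits
--         while bits >= tobits:
--             bits -= tobits
--             ret.append((acc >> bits) & maxv)
--     if pad:
--         if bits:
--             ret.append((acc << (tobits - bits)) & maxv)
--     elif bits >= frombits or ((acc << (tobits - bits)) & maxv):
--         return None
--     return ret
-- ===== SOURCE B (Python) =====
-- import typing as tp
--
-- def convertbits(data:tp.List[int], frombits:int, tobits:int, pad:bool=True) -> tp.Optional[tp.List[int]]:
--     """General power-of-2 base conversion, as two separate phases: fold the whole
--     input into one big integer, then slice every output chunk out of it."""
--     big = 0
--     total = 0
--     for value in data:
--         if value < 0 or (value >> frombits):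
--             return None
--         big = (big << frombits) | value
--         total += frombits
--     maxv = (1 << tobits) - 1
--     n, rem = divmod(total, tobits)
--     ret = [(big >> (total - (i + 1) * tobits)) & maxv for i in range(n)]
--     if rem == 0:
--         return ret
--     tail = big & ((1 << rem) - 1)
--     if pad:
--         ret.append((tail << (tobits - rem)) & maxv)
--         return ret
--     if rem >= frombits or tail:
--         return None
--     return ret
-- ===== Notes on version B (the rewrite author's own statement) =====
-- stated objective: alternative
-- what changed: A interleaves accumulation and chunk emission in one streaming loop with a bounded masked accumulator and an inner while; B separates the conversion into two phases: a single fold of all inputs into one unbounded big integer plus a bit count, then a closed-form slice (big >> (total-(i+1)*tobits)) & maxv for each output chunk, with the leftover handled from rem = total % tobits.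
-- outside the precondition, e.g. on convertbits([0], 0, 5, False): A returns None, B returns []; on convertbits([], -1, 2, False): A returns None, B returns []; on convertbits([], 1, 0, True): A returns [], B raises ZeroDivisionError
import Mathlib
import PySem

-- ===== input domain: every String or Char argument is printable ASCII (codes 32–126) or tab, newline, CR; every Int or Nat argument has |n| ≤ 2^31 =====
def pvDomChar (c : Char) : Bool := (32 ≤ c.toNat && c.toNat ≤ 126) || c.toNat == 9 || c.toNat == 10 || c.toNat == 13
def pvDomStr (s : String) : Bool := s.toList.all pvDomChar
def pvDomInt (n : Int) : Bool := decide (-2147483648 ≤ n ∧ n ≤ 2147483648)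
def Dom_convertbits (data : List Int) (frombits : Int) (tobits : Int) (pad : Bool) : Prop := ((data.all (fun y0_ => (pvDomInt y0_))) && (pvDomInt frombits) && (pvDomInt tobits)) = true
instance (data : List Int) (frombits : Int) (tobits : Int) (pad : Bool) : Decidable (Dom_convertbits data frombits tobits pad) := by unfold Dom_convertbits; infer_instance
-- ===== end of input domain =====

-- B replaces A's interleaved accumulate-and-emit streaming loop by two phases (fold all input
-- into one big integer, then slice each output chunk by a closed-form shift); objective:
-- alternative decomposition, not speed.

-- ===== PORT A =====
-- Python `x << n` / `x >> n` on our Int arguments (exact for 0 ≤ n; Pre_ keeps widths positive)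
def pyShl (a n : Int) : Int := a <<< n.toNat
def pyShr (a n : Int) : Int := a >>> n.toNat

-- the inner `while bits >= tobits` loop of A (the `0 < tobits` test is only a totality guard:
-- for tobits ≤ 0 the Python loop never terminates or was never reached, and Pre_ excludes it)
def convertbitsEmit (tobits maxv acc : Int) (bits : Int) (ret : List Int) : Int × List Int :=
  if 0 < tobits ∧ tobits ≤ bits then
    convertbitsEmit tobits maxv acc (bits - tobits)
      (ret ++ [PySem.Int.band (pyShr acc (bits - tobits)) maxv])
  else (bits, ret)
termination_by bits.toNat
decreasing_by omega

-- the outer `for value in data` loop of A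
def convertbitsLoop (frombits tobits maxv maxacc : Int) :
    List Int → Int → Int → List Int → Option (Int × Int × List Int)
  | [], acc, bits, ret => some (acc, bits, ret)
  | value :: rest, acc, bits, ret =>
    if value < 0 ∨ pyShr value frombits ≠ 0 then none
    else
      let acc' := PySem.Int.band (PySem.Int.bor (pyShl acc frombits) value) maxacc
      let p := convertbitsEmit tobits maxv acc' (bits + frombits) ret
      convertbitsLoop frombits tobits maxv maxacc rest acc' p.1 p.2

def convertbits (data : List Int) (frombits : Int) (tobits : Int) (pad : Bool) : Option (List Int) :=
  let maxv := pyShl 1 tobits - 1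
  let maxacc := pyShl 1 (frombits + tobits - 1) - 1
  match convertbitsLoop frombits tobits maxv maxacc data 0 0 [] with
  | none => none
  | some (acc, bits, ret) =>
    if pad then
      if bits ≠ 0 then some (ret ++ [PySem.Int.band (pyShl acc (tobits - bits)) maxv])
      else some ret
    else if frombits ≤ bits ∨ PySem.Int.band (pyShl acc (tobits - bits)) maxv ≠ 0 then none
    else some ret

-- ===== PORT B =====
-- phase 1 of B: fold the whole input into one big integer while counting bits
def convertbitsAltFold (frombits : Int) : List Int → Int → Int → Option (Int × Int)
  | [], big, total => some (big, total)
  | value :: rest, big, total =>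
    if value < 0 ∨ pyShr value frombits ≠ 0 then none
    else convertbitsAltFold frombits rest (PySem.Int.bor (pyShl big frombits) value) (total + frombits)

def convertbits_alt (data : List Int) (frombits : Int) (tobits : Int) (pad : Bool) : Option (List Int) :=
  match convertbitsAltFold frombits data 0 0 with
  | none => none
  | some (big, total) =>
    let maxv := pyShl 1 tobits - 1
    -- n, rem = divmod(total, tobits)  (tobits ≠ 0 under Pre_)
    let n := PySem.Int.floordiv total tobits
    let rem := PySem.Int.mod total tobits
    let ret := (PySem.List.pyRange 0 n 1).map
      (fun i => PySem.Int.band (pyShr big (total - (i + 1) * tobits)) maxv)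
    if rem = 0 then some ret
    else
      let tail := PySem.Int.band big (pyShl 1 rem - 1)
      if pad then some (ret ++ [PySem.Int.band (pyShl tail (tobits - rem)) maxv])
      else if frombits ≤ rem ∨ tail ≠ 0 then none
      else some ret

-- ===== PRECONDITION & SPEC =====
-- Pre_ restricts to positive bit widths, the natural domain of a power-of-2 base conversion:
-- for tobits ≤ 0 Python A raises (negative shift) or loops forever, and for frombits ≤ 0 it
-- raises, or returns degenerate 0-width-corner values that B's arithmetic decomposition does
-- not reproduce (B raises ZeroDivisionError for tobits = 0).
def Pre_convertbits (data : List Int) (frombits : Int) (tobits : Int) (pad : Bool) : Prop :=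
  1 ≤ frombits ∧ 1 ≤ tobits
instance (data : List Int) (frombits : Int) (tobits : Int) (pad : Bool) : Decidable (Pre_convertbits data frombits tobits pad) := by unfold Pre_convertbits; infer_instance
def pvWitness_convertbits : List Int × Int × Int × Bool := ([3, 7, 12], 4, 3, true)

def Spec_convertbits (data : List Int) (frombits : Int) (tobits : Int) (pad : Bool) (out : Option (List Int)) : Prop := out = convertbits_alt data frombits tobits pad
instance (data : List Int) (frombits : Int) (tobits : Int) (pad : Bool) (out : Option (List Int)) : Decidable (Spec_convertbits data frombits tobits pad out) := by unfold Spec_convertbits; infer_instance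

-- ===== CLAIM (what is proved, stated in full; the proofs are below) =====
def Claim_equal_convertbits : Prop := ∀ (data : List Int) (frombits : Int) (tobits : Int) (pad : Bool), Dom_convertbits data frombits tobits pad → Pre_convertbits data frombits tobits pad → Spec_convertbits data frombits tobits pad (convertbits data frombits tobits pad)

-- ===== LEMMAS AND PROOFS =====

-- Nat model of B's fold (values of data are still Int; state is Nat)
def altFoldN (F : Nat) : List Int → Nat → Nat → Option (Nat × Nat)
  | [], b, tt => some (b, tt)
  | v :: rest, b, tt =>
    if 0 ≤ v ∧ v < (2 ^ F : Int) then altFoldN F rest (b * 2 ^ F + v.toNat) (tt + F) else none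

-- the list of T-bit chunks of B read top-down: windows [s-T,s), [s-2T,s-T), …, c of them
def sliceDown (B T : Nat) : Nat → Nat → List Int
  | 0, _ => []
  | c + 1, s => ((B / 2 ^ (s - T) % 2 ^ T : Nat) : Int) :: sliceDown B T c (s - T)

theorem shl_natCast (a k : Nat) : ((a : Int) <<< k) = ((a <<< k : Nat) : Int) := rfl
theorem shr_natCast (a k : Nat) : ((a : Int) >>> k) = ((a >>> k : Nat) : Int) := rfl

theorem pow_natCast_int (F : Nat) : ((2 ^ F : Nat) : Int) = (2 : Int) ^ F := by push_cast; ring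

theorem toNat_lt_two_pow {F : Nat} {v : Int} (h : v < (2 ^ F : Int)) : v.toNat < 2 ^ F := by
  have h1 := pow_natCast_int F
  have h2 := Nat.two_pow_pos F
  omega

theorem lor_add_of_lt : ∀ (F a v : Nat), v < 2 ^ F → (a * 2 ^ F) ||| v = a * 2 ^ F + v := by
  intro F
  induction F with
  | zero =>
    intro a v h
    have : v = 0 := by omega
    subst this; simp
  | succ F IH =>
    intro a v h
    have hps : (2 : Nat) ^ (F + 1) = 2 * 2 ^ F := by rw [pow_succ]; ring
    have h2 : v / 2 < 2 ^ F := by omega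
    have hb : (decide (v % 2 = 1)).toNat = v % 2 := by
      rcases Nat.mod_two_eq_zero_or_one v with h' | h' <;> simp [h']
    have hv : v = Nat.bit (decide (v % 2 = 1)) (v / 2) := by
      rw [Nat.bit_val, hb]; omega
    have ha : a * 2 ^ (F + 1) = Nat.bit false (a * 2 ^ F) := by
      rw [Nat.bit_val, hps]; simp; ring
    rw [ha]
    conv_lhs => rw [hv]
    rw [Nat.lor_bit]
    simp only [Bool.false_or, Nat.bit_val, Bool.toNat_false]
    rw [IH a (v / 2) h2, hb]
    omega

theorem sliceDown_append (B T : Nat) : ∀ (c₁ : Nat) (c₂ s : Nat),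
    sliceDown B T (c₁ + c₂) s = sliceDown B T c₁ s ++ sliceDown B T c₂ (s - c₁ * T) := by
  intro c₁
  induction c₁ with
  | zero => intro c₂ s; simp [sliceDown]
  | succ c IH =>
    intro c₂ s
    have h1 : c + 1 + c₂ = (c + c₂) + 1 := by omega
    rw [h1]
    show sliceDown B T ((c + c₂) + 1) s = _
    rw [sliceDown, sliceDown, IH c₂ (s - T)]
    have h2 : (c + 1) * T = c * T + T := by ring
    have h3 : s - T - c * T = s - (c + 1) * T := by omega
    rw [h3]
    simp

theorem sliceDown_congr (A B T : Nat) : ∀ (c s n : Nat), s ≤ n → c * T ≤ s →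
    A % 2 ^ n = B % 2 ^ n → sliceDown A T c s = sliceDown B T c s := by
  intro c
  induction c with
  | zero => intro s n _ _ _; rfl
  | succ c IH =>
    intro s n hs hc h
    have hcc : (c + 1) * T = c * T + T := by ring
    have hTs : T ≤ s := by omega
    rw [sliceDown, sliceDown]
    have hwin : A / 2 ^ (s - T) % 2 ^ T = B / 2 ^ (s - T) % 2 ^ T := by
      rw [← Nat.mod_mul_right_div_self, ← Nat.mod_mul_right_div_self, ← pow_add]
      have heq : s - T + T = s := by omega
      rw [heq]
      have hA : A % 2 ^ s = A % 2 ^ n % 2 ^ s := (Nat.mod_mod_of_dvd A (pow_dvd_pow 2 hs)).symm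
      have hB : B % 2 ^ s = B % 2 ^ n % 2 ^ s := (Nat.mod_mod_of_dvd B (pow_dvd_pow 2 hs)).symm
      rw [hA, hB, h]
    rw [hwin, IH (s - T) n (by omega) (by omega) h]

theorem sliceDown_prefix (b r d T : Nat) (hr : r < 2 ^ d) : ∀ (c s : Nat), c * T ≤ s →
    sliceDown (b * 2 ^ d + r) T c (s + d) = sliceDown b T c s := by
  intro c
  induction c with
  | zero => intro s _; rfl
  | succ c IH =>
    intro s hc
    have hcc : (c + 1) * T = c * T + T := by ring
    have hTs : T ≤ s := by omega
    rw [sliceDown, sliceDown]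
    have he : s + d - T = (s - T) + d := by omega
    have hdiv : (b * 2 ^ d + r) / 2 ^ ((s - T) + d) = b / 2 ^ (s - T) := by
      have hp : (2 : Nat) ^ ((s - T) + d) = 2 ^ d * 2 ^ (s - T) := by rw [pow_add]; ring
      rw [hp, ← Nat.div_div_eq_div_mul]
      congr 1
      rw [mul_comm b, Nat.mul_add_div (Nat.two_pow_pos d), Nat.div_eq_of_lt hr]
      omega
    rw [he, hdiv, IH (s - T) (by omega)]

-- the inner while-loop of A emits exactly the top-down chunks of its accumulator
theorem emit_spec (T : Nat) (hT : 1 ≤ T) (a : Nat) :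
    ∀ (b : Nat) (ret : List Int),
      convertbitsEmit (T : Int) ((2 ^ T - 1 : Nat) : Int) (a : Int) (b : Int) ret
        = (((b % T : Nat) : Int), ret ++ sliceDown a T (b / T) b) := by
  intro b
  induction b using Nat.strong_induction_on with
  | _ b IH =>
    intro ret
    rw [convertbitsEmit]
    by_cases hTb : T ≤ b
    · rw [if_pos (by constructor <;> omega)]
      have hcast : (b : Int) - (T : Int) = ((b - T : Nat) : Int) := by omega
      have hchunk : PySem.Int.band (pyShr (a : Int) ((b - T : Nat) : Int)) ((2 ^ T - 1 : Nat) : Int)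
          = ((a / 2 ^ (b - T) % 2 ^ T : Nat) : Int) := by
        unfold pyShr
        rw [Int.toNat_natCast, shr_natCast, PySem.Int.band_natCast,
          Nat.shiftRight_eq_div_pow, Nat.and_two_pow_sub_one_eq_mod]
      rw [hcast, hchunk, IH (b - T) (by omega) (ret ++ [((a / 2 ^ (b - T) % 2 ^ T : Nat) : Int)])]
      have hm : (b - T) % T = b % T := (Nat.mod_eq_sub_mod hTb).symm
      have hd : b / T = (b - T) / T + 1 := Nat.div_eq_sub_div (by omega) hTb
      rw [hm, hd, sliceDown, List.append_assoc]
      rfl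
    · rw [if_neg (by push_cast; omega)]
      rw [Nat.mod_eq_of_lt (by omega), Nat.div_eq_of_lt (by omega)]
      simp [sliceDown]

-- the validity test of both loops, reduced to one closed condition
theorem guard_iff (F : Nat) (v : Int) :
    (v < 0 ∨ pyShr v (F : Int) ≠ 0) ↔ ¬(0 ≤ v ∧ v < (2 ^ F : Int)) := by
  by_cases h0 : 0 ≤ v
  · obtain ⟨n, rfl⟩ : ∃ n : Nat, v = (n : Int) := ⟨v.toNat, (Int.toNat_of_nonneg h0).symm⟩
    unfold pyShr
    rw [Int.toNat_natCast, shr_natCast, Nat.shiftRight_eq_div_pow, ← pow_natCast_int]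
    have hnz : n / 2 ^ F ≠ 0 ↔ 2 ^ F ≤ n := by
      constructor
      · intro h; exact (Nat.div_ne_zero_iff.mp h).2
      · intro h; exact Nat.div_ne_zero_iff.mpr ⟨(Nat.two_pow_pos F).ne', h⟩
    constructor
    · intro h
      rcases h with h | h
      · omega
      · have := hnz.mp (by exact_mod_cast h)
        intro hx; omega
    · intro h
      right
      have : 2 ^ F ≤ n := by omega
      exact_mod_cast hnz.mpr this
  · constructor
    · intro _ h; omega
    · intro _; left; omega

-- B's fold is the Nat model
theorem altFold_bridge (F : Nat) :
    ∀ (data : List Int) (b tt : Nat),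
      convertbitsAltFold (F : Int) data (b : Int) (tt : Int)
        = (altFoldN F data b tt).map (fun p => ((p.1 : Int), (p.2 : Int))) := by
  intro data
  induction data with
  | nil => intro b tt; rfl
  | cons v rest IH =>
    intro b tt
    rw [convertbitsAltFold, altFoldN]
    by_cases hv : 0 ≤ v ∧ v < (2 ^ F : Int)
    · rw [if_neg (by rw [guard_iff]; exact not_not_intro hv), if_pos hv]
      have hvlt : v.toNat < 2 ^ F := toNat_lt_two_pow hv.2
      have hbor : PySem.Int.bor (pyShl (b : Int) (F : Int)) v = ((b * 2 ^ F + v.toNat : Nat) : Int) := by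
        conv_lhs => rw [show v = ((v.toNat : Nat) : Int) from (Int.toNat_of_nonneg hv.1).symm]
        unfold pyShl
        rw [Int.toNat_natCast, shl_natCast, PySem.Int.bor_natCast, Nat.shiftLeft_eq,
          lor_add_of_lt F b v.toNat hvlt]
      have htt : (tt : Int) + (F : Int) = ((tt + F : Nat) : Int) := by omega
      rw [hbor, htt, IH]
    · rw [if_pos (by rw [guard_iff]; exact hv), if_neg hv]
      rfl

-- the fold only appends bits below the old ones
theorem altFoldN_decomp (F : Nat) :
    ∀ (data : List Int) (b tt B TT : Nat), altFoldN F data b tt = some (B, TT) →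
      ∃ d r, TT = tt + d ∧ r < 2 ^ d ∧ B = b * 2 ^ d + r := by
  intro data
  induction data with
  | nil =>
    intro b tt B TT h
    simp [altFoldN] at h
    exact ⟨0, 0, by omega, by norm_num, by simp [h.1.symm]⟩
  | cons v rest IH =>
    intro b tt B TT h
    rw [altFoldN] at h
    by_cases hv : 0 ≤ v ∧ v < (2 ^ F : Int)
    · rw [if_pos hv] at h
      obtain ⟨d', r', h1, h2, h3⟩ := IH (b * 2 ^ F + v.toNat) (tt + F) B TT h
      refine ⟨F + d', v.toNat * 2 ^ d' + r', by omega, ?_, ?_⟩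
      · have hvlt : v.toNat < 2 ^ F := toNat_lt_two_pow hv.2
        calc v.toNat * 2 ^ d' + r' < v.toNat * 2 ^ d' + 2 ^ d' := by omega
          _ ≤ 2 ^ F * 2 ^ d' := by nlinarith [Nat.two_pow_pos d']
          _ = 2 ^ (F + d') := by rw [pow_add]
      · rw [h3, pow_add]; ring
    · rw [if_neg hv] at h
      exact absurd h (by simp)

-- main invariant: A's loop tracks B's fold, emitting exactly B's chunk slices
theorem loop_main (F T : Nat) (hF : 1 ≤ F) (hT : 1 ≤ T) :
    ∀ (rest : List Int) (a b tt : Nat) (ret : List Int),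
      a % 2 ^ (tt % T) = b % 2 ^ (tt % T) →
      (match altFoldN F rest b tt with
       | none => convertbitsLoop (F : Int) (T : Int) ((2 ^ T - 1 : Nat) : Int)
            ((2 ^ (F + T - 1) - 1 : Nat) : Int) rest (a : Int) ((tt % T : Nat) : Int) ret = none
       | some (B, TT) => ∃ A', A' % 2 ^ (TT % T) = B % 2 ^ (TT % T) ∧
           convertbitsLoop (F : Int) (T : Int) ((2 ^ T - 1 : Nat) : Int)
            ((2 ^ (F + T - 1) - 1 : Nat) : Int) rest (a : Int) ((tt % T : Nat) : Int) ret
             = some ((A' : Int), ((TT % T : Nat) : Int),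
                 ret ++ sliceDown B T (TT / T - tt / T) (TT - (tt / T) * T))) := by
  intro rest
  induction rest with
  | nil =>
    intro a b tt ret hcong
    simp only [altFoldN]
    exact ⟨a, hcong, by simp [convertbitsLoop, sliceDown]⟩
  | cons v rest IH =>
    intro a b tt ret hcong
    simp only [altFoldN]
    by_cases hv : 0 ≤ v ∧ v < (2 ^ F : Int)
    · rw [if_pos hv]
      obtain ⟨a₁, ha₁⟩ : ∃ x : Nat, x = (a * 2 ^ F + v.toNat) % 2 ^ (F + T - 1) := ⟨_, rfl⟩
      obtain ⟨b₁, hb₁⟩ : ∃ x : Nat, x = b * 2 ^ F + v.toNat := ⟨_, rfl⟩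
      obtain ⟨tt₁, htt₁⟩ : ∃ x : Nat, x = tt + F := ⟨_, rfl⟩
      rw [← hb₁, ← htt₁]
      have hvlt : v.toNat < 2 ^ F := toNat_lt_two_pow hv.2
      have hacc : PySem.Int.band (PySem.Int.bor (pyShl (a : Int) (F : Int)) v)
          ((2 ^ (F + T - 1) - 1 : Nat) : Int) = ((a₁ : Nat) : Int) := by
        rw [ha₁]
        conv_lhs => rw [show v = ((v.toNat : Nat) : Int) from (Int.toNat_of_nonneg hv.1).symm]
        unfold pyShl
        rw [Int.toNat_natCast, shl_natCast, PySem.Int.bor_natCast, Nat.shiftLeft_eq,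
          lor_add_of_lt F a v.toNat hvlt, PySem.Int.band_natCast,
          Nat.and_two_pow_sub_one_eq_mod]
      have hbits : ((tt % T : Nat) : Int) + (F : Int) = ((tt % T + F : Nat) : Int) := by
        push_cast; ring
      have hemit := emit_spec T hT a₁ (tt % T + F) ret
      have hmm : (tt % T + F) % T = tt₁ % T := by
        rw [htt₁, Nat.mod_add_mod]
      have hstep : ∀ n, n ≤ tt % T + F → (a * 2 ^ F + v.toNat) % 2 ^ n = b₁ % 2 ^ n := by
        intro n hn
        have h1 : a * 2 ^ F ≡ b * 2 ^ F [MOD 2 ^ (tt % T) * 2 ^ F] :=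
          Nat.ModEq.mul_right' _ hcong
        have h2 : a * 2 ^ F + v.toNat ≡ b₁ [MOD 2 ^ (tt % T + F)] := by
          rw [hb₁, ← pow_add] at *
          exact h1.add_right v.toNat
        exact h2.of_dvd (pow_dvd_pow 2 hn)
      have hmle : tt % T + F ≤ F + T - 1 := by
        have := Nat.mod_lt tt (show 0 < T by omega)
        omega
      have ha₁mod : ∀ n, n ≤ F + T - 1 → a₁ % 2 ^ n = (a * 2 ^ F + v.toNat) % 2 ^ n := by
        intro n hn
        rw [ha₁, Nat.mod_mod_of_dvd _ (pow_dvd_pow 2 hn)]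
      have hcong' : a₁ % 2 ^ (tt₁ % T) = b₁ % 2 ^ (tt₁ % T) := by
        have hle : tt₁ % T ≤ tt % T + F := by
          rw [← hmm]; exact Nat.mod_le _ _
        rw [ha₁mod _ (le_trans hle hmle)]
        exact hstep _ hle
      have IH' := IH a₁ b₁ tt₁ (ret ++ sliceDown a₁ T ((tt % T + F) / T) (tt % T + F)) hcong'
      have hloop : convertbitsLoop (F : Int) (T : Int) ((2 ^ T - 1 : Nat) : Int)
            ((2 ^ (F + T - 1) - 1 : Nat) : Int) (v :: rest) (a : Int) ((tt % T : Nat) : Int) ret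
          = convertbitsLoop (F : Int) (T : Int) ((2 ^ T - 1 : Nat) : Int)
            ((2 ^ (F + T - 1) - 1 : Nat) : Int) rest ((a₁ : Nat) : Int)
            ((tt₁ % T : Nat) : Int)
            (ret ++ sliceDown a₁ T ((tt % T + F) / T) (tt % T + F)) := by
        rw [convertbitsLoop]
        rw [if_neg (by rw [guard_iff]; exact not_not_intro hv)]
        simp only [hacc, hbits, hemit, hmm]
      rw [hloop]
      cases haf : altFoldN F rest b₁ tt₁ with
      | none =>
        rw [haf] at IH'
        exact IH'
      | some p =>
        obtain ⟨B, TT⟩ := p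
        rw [haf] at IH'
        obtain ⟨A', hA, hEq⟩ := IH'
        refine ⟨A', hA, ?_⟩
        rw [hEq]
        obtain ⟨d, r, hd1, hd2, hd3⟩ := altFoldN_decomp F rest b₁ tt₁ B TT haf
        have hc₁le : ((tt % T + F) / T) * T ≤ tt % T + F := Nat.div_mul_le_self _ _
        have hS₁ : sliceDown a₁ T ((tt % T + F) / T) (tt % T + F)
            = sliceDown B T ((tt % T + F) / T) ((tt % T + F) + d) := by
          rw [sliceDown_congr a₁ b₁ T ((tt % T + F) / T) (tt % T + F) (tt % T + F)
            (le_refl _) hc₁le (by rw [ha₁mod _ hmle]; exact hstep _ (le_refl _))]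
          rw [hd3, sliceDown_prefix b₁ r d T hd2 _ _ hc₁le]
        rw [hS₁, List.append_assoc]
        congr 1
        have htd : tt₁ / T = tt / T + (tt % T + F) / T := by
          have h1 : tt₁ = T * (tt / T) + (tt % T + F) := by
            have := Nat.div_add_mod tt T
            omega
          rw [h1, Nat.mul_add_div (by omega)]
        have htdle : tt₁ / T ≤ TT / T := Nat.div_le_div_right (show tt₁ ≤ TT by omega)
        have hcount : TT / T - tt / T = (tt % T + F) / T + (TT / T - tt₁ / T) := by
          revert htdle htd
          generalize (tt % T + F) / T = Z
          generalize tt / T = Y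
          generalize tt₁ / T = W
          generalize TT / T = X
          intro htd htdle
          omega
        have hmod : tt = (tt / T) * T + tt % T := by
          rw [mul_comm]
          exact (Nat.div_add_mod tt T).symm
        have hs₀ : TT - (tt / T) * T = (tt % T + F) + d := by omega
        have hprod : (tt₁ / T) * T = ((tt % T + F) / T) * T + (tt / T) * T := by
          rw [htd]; ring
        have hs₂ : (tt % T + F) + d - ((tt % T + F) / T) * T = TT - (tt₁ / T) * T := by
          omega
        rw [hcount, sliceDown_append, hs₀, hs₂]
    · rw [if_neg hv]
      rw [convertbitsLoop]
      rw [if_pos (by rw [guard_iff]; exact hv)]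

-- B's comprehension over range(n) is the same chunk list
theorem map_range_slice (B T : Nat) :
    ∀ (q s : Nat), q * T ≤ s →
      (List.range q).map (fun (k : Nat) =>
          PySem.Int.band (pyShr (B : Int) ((s : Int) - ((k : Int) + 1) * (T : Int)))
            ((2 ^ T - 1 : Nat) : Int))
        = sliceDown B T q s := by
  intro q
  induction q with
  | zero => intro s _; rfl
  | succ q IH =>
    intro s hq
    have hqq : (q + 1) * T = q * T + T := by ring
    have hTs : T ≤ s := by omega
    rw [List.range_succ_eq_map, List.map_cons, List.map_map]
    have hhead : PySem.Int.band (pyShr (B : Int) ((s : Int) - (((0 : Nat) : Int) + 1) * (T : Int)))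
        ((2 ^ T - 1 : Nat) : Int) = ((B / 2 ^ (s - T) % 2 ^ T : Nat) : Int) := by
      have hc : (s : Int) - (((0 : Nat) : Int) + 1) * (T : Int) = ((s - T : Nat) : Int) := by
        push_cast; omega
      rw [hc]
      unfold pyShr
      rw [Int.toNat_natCast, shr_natCast, PySem.Int.band_natCast,
        Nat.shiftRight_eq_div_pow, Nat.and_two_pow_sub_one_eq_mod]
    have htail : (List.range q).map ((fun (k : Nat) =>
          PySem.Int.band (pyShr (B : Int) ((s : Int) - ((k : Int) + 1) * (T : Int)))
            ((2 ^ T - 1 : Nat) : Int)) ∘ Nat.succ)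
        = sliceDown B T q (s - T) := by
      rw [← IH (s - T) (by omega)]
      apply List.map_congr_left
      intro k _
      simp only [Function.comp_apply]
      congr 2
      push_cast
      have h1 : ((s - T : Nat) : Int) = (s : Int) - (T : Int) := by omega
      rw [h1]
      ring
    rw [hhead, htail, sliceDown]

-- ===== VERDICT (by name: the statement is the Claim_ definition above) =====
theorem convertbits_spec : Claim_equal_convertbits := by
  unfold Claim_equal_convertbits
  intro data f t pad _ hpre
  obtain ⟨hf, ht⟩ := hpre
  unfold Spec_convertbits
  obtain ⟨F, rfl⟩ : ∃ F : Nat, f = (F : Int) := ⟨f.toNat, (Int.toNat_of_nonneg (by omega)).symm⟩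
  obtain ⟨T, rfl⟩ : ∃ T : Nat, t = (T : Int) := ⟨t.toNat, (Int.toNat_of_nonneg (by omega)).symm⟩
  have hF : 1 ≤ F := by exact_mod_cast hf
  have hT : 1 ≤ T := by exact_mod_cast ht
  have h2T : 1 ≤ 2 ^ T := Nat.one_le_two_pow
  have hmaxv : pyShl 1 (T : Int) - 1 = ((2 ^ T - 1 : Nat) : Int) := by
    unfold pyShl
    rw [Int.toNat_natCast]
    rw [show ((1 : Int) <<< T) = (((1 <<< T : Nat) : Nat) : Int) from rfl]
    rw [Nat.shiftLeft_eq, one_mul]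
    omega
  have hmaxacc : pyShl 1 ((F : Int) + (T : Int) - 1) - 1 = ((2 ^ (F + T - 1) - 1 : Nat) : Int) := by
    unfold pyShl
    have : ((F : Int) + (T : Int) - 1).toNat = F + T - 1 := by omega
    rw [this]
    rw [show ((1 : Int) <<< (F + T - 1)) = (((1 <<< (F + T - 1) : Nat) : Nat) : Int) from rfl]
    rw [Nat.shiftLeft_eq, one_mul]
    have : 1 ≤ 2 ^ (F + T - 1) := Nat.one_le_two_pow
    omega
  simp only [convertbits, convertbits_alt, hmaxv, hmaxacc]
  have hbr := altFold_bridge F data 0 0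
  simp only [Nat.cast_zero] at hbr
  rw [hbr]
  have hmain := loop_main F T hF hT data 0 0 0 [] (by rfl)
  cases hfold : altFoldN F data 0 0 with
  | none =>
    rw [hfold] at hmain
    simp only [Nat.zero_mod, Nat.cast_zero] at hmain
    simp only [Option.map_none]
    rw [hmain]
  | some p =>
    obtain ⟨B, TT⟩ := p
    rw [hfold] at hmain
    obtain ⟨A', hA, hEq⟩ := hmain
    simp only [Nat.zero_mod, Nat.cast_zero, Nat.zero_div, Nat.sub_zero, Nat.zero_mul,
      List.nil_append] at hEq
    simp only [Option.map_some]
    rw [hEq]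
    simp only []
    -- B's chunk list is the same slice list
    rw [PySem.Int.floordiv_natCast, PySem.Int.mod_natCast, PySem.List.pyRange_zero_natCast,
      List.map_map]
    have hret : (List.range (TT / T)).map ((fun i => PySem.Int.band
          (pyShr ((B : Nat) : Int) (((TT : Nat) : Int) - (i + 1) * ((T : Nat) : Int)))
          ((2 ^ T - 1 : Nat) : Int)) ∘ (Nat.cast : Nat → Int))
        = sliceDown B T (TT / T) TT := by
      rw [← map_range_slice B T (TT / T) TT (Nat.div_mul_le_self _ _)]
      rfl
    rw [hret]
    set m := TT % T with hm
    set R := sliceDown B T (TT / T) TT with hR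
    by_cases hm0 : m = 0
    · rw [hm0]
      simp only [Nat.cast_zero]
      have hpadchunk : PySem.Int.band (pyShl ((A' : Nat) : Int) ((T : Int) - (0 : Int)))
          ((2 ^ T - 1 : Nat) : Int) = (0 : Int) := by
        unfold pyShl
        have h1 : ((T : Int) - (0 : Int)).toNat = T := by omega
        rw [h1, shl_natCast, PySem.Int.band_natCast, Nat.shiftLeft_eq,
          Nat.and_two_pow_sub_one_eq_mod, Nat.mul_mod_left]
        simp
      cases pad with
      | true => simp
      | false =>
        rw [if_neg (show ¬(false = true) by simp), hpadchunk]
        rw [if_neg (show ¬((F : Int) ≤ 0 ∨ (0 : Int) ≠ 0) by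
          rintro (h | h)
          · omega
          · exact h rfl)]
        simp
    · have hmne : ((m : Nat) : Int) ≠ 0 := by exact_mod_cast hm0
      have hmT : m < T := by rw [hm]; exact Nat.mod_lt _ (by omega)
      have hsplit : (2 : Nat) ^ T = 2 ^ m * 2 ^ (T - m) := by
        rw [← pow_add]
        congr 1
        omega
      have htail : PySem.Int.band ((B : Nat) : Int) (pyShl 1 ((m : Nat) : Int) - 1)
          = ((B % 2 ^ m : Nat) : Int) := by
        unfold pyShl
        rw [Int.toNat_natCast]
        rw [show ((1 : Int) <<< m) = (((1 <<< m : Nat) : Nat) : Int) from rfl]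
        rw [Nat.shiftLeft_eq, one_mul]
        have h1 : ((2 ^ m : Nat) : Int) - 1 = ((2 ^ m - 1 : Nat) : Int) := by
          have := Nat.one_le_two_pow (n := m)
          omega
        rw [h1, PySem.Int.band_natCast, Nat.and_two_pow_sub_one_eq_mod]
      have hAchunk : PySem.Int.band (pyShl ((A' : Nat) : Int) ((T : Int) - ((m : Nat) : Int)))
          ((2 ^ T - 1 : Nat) : Int) = ((B % 2 ^ m * 2 ^ (T - m) : Nat) : Int) := by
        unfold pyShl
        have h1 : ((T : Int) - ((m : Nat) : Int)).toNat = T - m := by omega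
        rw [h1, shl_natCast, PySem.Int.band_natCast, Nat.shiftLeft_eq,
          Nat.and_two_pow_sub_one_eq_mod, hsplit, Nat.mul_mod_mul_right, hA]
      have hBchunk : PySem.Int.band (pyShl (((B % 2 ^ m : Nat) : Int)) ((T : Int) - ((m : Nat) : Int)))
          ((2 ^ T - 1 : Nat) : Int) = ((B % 2 ^ m * 2 ^ (T - m) : Nat) : Int) := by
        unfold pyShl
        have h1 : ((T : Int) - ((m : Nat) : Int)).toNat = T - m := by omega
        rw [h1, shl_natCast, PySem.Int.band_natCast, Nat.shiftLeft_eq,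
          Nat.and_two_pow_sub_one_eq_mod]
        congr 1
        apply Nat.mod_eq_of_lt
        calc B % 2 ^ m * 2 ^ (T - m) < 2 ^ m * 2 ^ (T - m) :=
              mul_lt_mul_of_pos_right (Nat.mod_lt _ (Nat.two_pow_pos m)) (Nat.two_pow_pos (T - m))
          _ = 2 ^ T := hsplit.symm
      cases pad with
      | true =>
        rw [if_pos rfl, if_pos hmne, hAchunk, if_neg hmne, if_pos rfl, htail, hBchunk]
      | false =>
        rw [if_neg (show ¬(false = true) by simp), if_neg hmne,
          if_neg (show ¬(false = true) by simp), hAchunk, htail]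
        by_cases hz : (B % 2 ^ m : Nat) = 0
        · simp only [hz, Nat.zero_mul, Nat.cast_zero]
        · have h2 : ((B % 2 ^ m : Nat) : Int) ≠ 0 := by exact_mod_cast hz
          have h3 : ((B % 2 ^ m * 2 ^ (T - m) : Nat) : Int) ≠ 0 := by
            have := Nat.two_pow_pos (T - m)
            have : B % 2 ^ m * 2 ^ (T - m) ≠ 0 := by positivity
            exact_mod_cast this
          rw [if_pos (Or.inr h3), if_pos (Or.inr h2)]
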